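-- pv_equiv track=rewrite | github.com/ZhiyuanYan/property-mining | reward/reward.py | find_max_coverage_subset
-- ===== SOURCE A (Python) =====
-- def find_max_coverage_subset(dict_of_lists):
--     # 创建一个包含所有1的集合
--     all_ones = set(i for lst in dict_of_lists.values() for i, val in enumerate(lst) if val == 1)
--
--     # 初始化一个空集合来存储最大覆盖的列表
--     max_coverage_subset = set()
--
--     while all_ones:
--         # 找到覆盖最多1的列表
--         best_list = max(dict_of_lists.keys(), key=lambda key: sum(1 for i, val in enumerate(dict_of_lists[key]) if val == 1))
--
--         # 添加这个列表到最大覆盖集合中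
--         max_coverage_subset.add(best_list)
--
--         # 更新all_ones，去掉已经被覆盖的1
--         all_ones -= {i for i, val in enumerate(dict_of_lists[best_list]) if val == 1}
--
--         # 从字典中删除已经覆盖的列表
--         del dict_of_lists[best_list]
--
--     return max_coverage_subset
-- ===== SOURCE B (Python) =====
-- def find_max_coverage_subset(dict_of_lists):
--     # Precompute each key's set of 1-indices once, sort keys stably by count
--     # descending, then take keys from that order until every 1 is covered.
--     ones = {k: {i for i, v in enumerate(lst) if v == 1} for k, lst in dict_of_lists.items()}
--     order = sorted(ones, key=lambda k: len(ones[k]), reverse=True)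
--     remaining = set()
--     for s in ones.values():
--         remaining |= s
--     chosen = set()
--     for k in order:
--         if not remaining:
--             break
--         chosen.add(k)
--         remaining -= ones[k]
--     return chosen
-- ===== Notes on version B (the rewrite author's own statement) =====
-- stated objective: faster
-- what changed: Instead of re-scanning every remaining list inside a while-loop max() each round (and mutating the dict), B computes each key's 1-index set once, sorts the keys stably by 1-count descending, and takes keys from that order until all ones are covered.
import Mathlib
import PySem

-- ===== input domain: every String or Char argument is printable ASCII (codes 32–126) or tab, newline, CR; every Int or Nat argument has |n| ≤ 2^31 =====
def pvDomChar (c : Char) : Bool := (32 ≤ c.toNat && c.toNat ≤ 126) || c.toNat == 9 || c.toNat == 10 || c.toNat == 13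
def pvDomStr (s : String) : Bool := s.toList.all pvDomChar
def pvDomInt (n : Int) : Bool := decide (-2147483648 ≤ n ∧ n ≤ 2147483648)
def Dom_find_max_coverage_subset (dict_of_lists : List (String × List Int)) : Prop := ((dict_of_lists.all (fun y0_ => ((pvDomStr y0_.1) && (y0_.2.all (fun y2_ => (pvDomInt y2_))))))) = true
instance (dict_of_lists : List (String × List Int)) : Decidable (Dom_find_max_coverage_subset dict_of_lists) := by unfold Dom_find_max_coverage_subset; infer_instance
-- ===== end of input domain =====

-- B replaces A's repeated full-dict max() scans by one count per key plus one stable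
-- descending sort (objective: faster). Python A mutates its argument (del); the
-- equivalence proved here is about the return value only.

-- ===== PORT A =====
-- {i for i, val in enumerate(lst) if val == 1}, as the generator list (both Pythons build it)
def pvOnesIdx (lst : List Int) : List Nat :=
  ((List.range lst.length).zip lst).foldl (fun acc iv => if iv.2 == 1 then acc ++ [iv.1] else acc) []

-- sum(1 for i, val in enumerate(lst) if val == 1)
def pvCountOnes (lst : List Int) : Nat :=
  lst.foldl (fun s v => if v == 1 then s + 1 else s) 0

-- dict_of_lists[key] (first match; only applied to present keys)
def pvLookup (d : List (String × List Int)) (k : String) : List Int :=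
  ((d.find? (fun p => p.1 == k)).map Prod.snd).getD []

-- A's while-loop; fuel = number of dict entries (each round deletes one entry)
def pvLoopA : Nat → List (String × List Int) → PySem.Set Nat → PySem.Set String → List String
  | 0, _, _, acc => acc
  | fuel+1, d, rem, acc =>
    if rem.isEmpty then acc
    else
      match PySem.List.max? (d.map Prod.fst) (fun k => pvCountOnes (pvLookup d k)) with
      | none => acc
      | some best =>
          pvLoopA fuel (d.filter (fun p => !(p.1 == best)))
            (PySem.Set.diff rem (PySem.Set.ofList (pvOnesIdx (pvLookup d best))))
            (PySem.Set.add acc best)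

def find_max_coverage_subset (dict_of_lists : List (String × List Int)) : List String :=
  let allOnes : PySem.Set Nat :=
    PySem.Set.ofList (dict_of_lists.foldl (fun acc kv => acc ++ pvOnesIdx kv.2) [])
  pvLoopA dict_of_lists.length dict_of_lists allOnes PySem.Set.empty

-- ===== PORT B =====
-- ones[k] (dict of precomputed 1-index sets)
def pvLookupS (ones : List (String × PySem.Set Nat)) (k : String) : PySem.Set Nat :=
  ((ones.find? (fun p => p.1 == k)).map Prod.snd).getD PySem.Set.empty

-- 'for k in order: if not remaining: break; chosen.add(k); remaining -= ones[k]'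
def pvPickB : List String → (String → PySem.Set Nat) → PySem.Set Nat → PySem.Set String → List String
  | [], _, _, chosen => chosen
  | k :: rest, f, rem, chosen =>
    if rem.isEmpty then chosen
    else pvPickB rest f (PySem.Set.diff rem (f k)) (PySem.Set.add chosen k)

def find_max_coverage_subset_alt (dict_of_lists : List (String × List Int)) : List String :=
  let ones : List (String × PySem.Set Nat) :=
    dict_of_lists.map (fun kv => (kv.1, PySem.Set.ofList (pvOnesIdx kv.2)))
  let order : List String :=
    PySem.List.sorted (ones.map Prod.fst) (fun k => (pvLookupS ones k).length) true
  let remaining : PySem.Set Nat :=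
    ones.foldl (fun r kv => PySem.Set.union r kv.2) PySem.Set.empty
  pvPickB order (fun k => pvLookupS ones k) remaining PySem.Set.empty

-- ===== PRECONDITION & SPEC =====
-- Pre_ only excludes association lists with a duplicated key: a Python dict cannot
-- contain duplicate keys, so such lists encode no input A ever receives.
def Pre_find_max_coverage_subset (dict_of_lists : List (String × List Int)) : Prop :=
  (dict_of_lists.map Prod.fst).Nodup

instance (dict_of_lists : List (String × List Int)) : Decidable (Pre_find_max_coverage_subset dict_of_lists) := by unfold Pre_find_max_coverage_subset; infer_instance

def pvWitness_find_max_coverage_subset : (List (String × List Int)) :=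
  [("a", [1, 0, 1]), ("b", [0, 1, 0])]

def Spec_find_max_coverage_subset (dict_of_lists : List (String × List Int)) (out : List String) : Prop := out = find_max_coverage_subset_alt dict_of_lists
instance (dict_of_lists : List (String × List Int)) (out : List String) : Decidable (Spec_find_max_coverage_subset dict_of_lists out) := by unfold Spec_find_max_coverage_subset; infer_instance

-- ===== CLAIM (what is proved, stated in full; the proofs are below) =====
def Claim_equal_find_max_coverage_subset : Prop := ∀ (dict_of_lists : List (String × List Int)), Dom_find_max_coverage_subset dict_of_lists → Pre_find_max_coverage_subset dict_of_lists → Spec_find_max_coverage_subset dict_of_lists (find_max_coverage_subset dict_of_lists)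

-- ===== LEMMAS AND PROOFS =====

-- A's loop re-expressed over the key list, looking everything up in ONE fixed table L
def pvLoopR (L : String → List Int) : Nat → List String → PySem.Set Nat → PySem.Set String → List String
  | 0, _, _, acc => acc
  | fuel+1, ks, rem, acc =>
    if rem.isEmpty then acc
    else
      match PySem.List.max? ks (fun k => pvCountOnes (L k)) with
      | none => acc
      | some b =>
          pvLoopR L fuel (ks.filter (fun k => !(k == b)))
            (PySem.Set.diff rem (PySem.Set.ofList (pvOnesIdx (L b))))
            (PySem.Set.add acc b)

-- ----- max?, stable-sort head extraction -----

-- insert BEFORE the first element of ≤ key (where a new 'oldest' element lands)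
def pvInsA (key : String → Nat) (a : String) (ys : List String) : List String :=
  PySem.List.insertBy (fun p q => decide (key q ≤ key p)) a ys

lemma pv_insB_insA_comm (key : String → Nat) :
    ∀ (ys : List String) (a x : String),
      PySem.List.insertBy (fun p q => decide (key q < key p)) x (pvInsA key a ys)
        = pvInsA key a (PySem.List.insertBy (fun p q => decide (key q < key p)) x ys) := by
  intro ys
  induction ys with
  | nil =>
    intro a x
    simp only [pvInsA, PySem.List.insertBy]
    split_ifs <;> simp only [decide_eq_true_eq] at * <;>
      first | rfl | (exfalso; omega)
  | cons y ys ih =>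
    intro a x
    have hih := ih a x
    simp only [pvInsA, PySem.List.insertBy] at hih ⊢
    split_ifs <;> simp only [decide_eq_true_eq] at * <;>
      simp_all [PySem.List.insertBy] <;> split_ifs <;>
      first | rfl | (exfalso; omega)

lemma pv_foldl_insB_insA (key : String → Nat) :
    ∀ (t acc : List String) (a : String),
      t.foldl (fun acc x => PySem.List.insertBy (fun p q => decide (key q < key p)) x acc) (pvInsA key a acc)
        = pvInsA key a (t.foldl (fun acc x => PySem.List.insertBy (fun p q => decide (key q < key p)) x acc) acc) := by
  intro t
  induction t with
  | nil => intro acc a; rfl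
  | cons x t ih =>
    intro acc a
    simp only [List.foldl_cons]
    rw [pv_insB_insA_comm, ih]

lemma pv_sorted_rev_cons (key : String → Nat) (a : String) (t : List String) :
    PySem.List.sorted (a :: t) key true = pvInsA key a (PySem.List.sorted t key true) := by
  rw [PySem.List.sorted_rev_eq_foldl_insertBy, PySem.List.sorted_rev_eq_foldl_insertBy]
  have h0 : PySem.List.insertBy (fun p q => decide (key q < key p)) a [] = pvInsA key a [] := rfl
  simp only [List.foldl_cons, h0]
  exact pv_foldl_insB_insA key t [] a

lemma pv_max_step (key : String → Nat) (a y : String) (t : List String) :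
    PySem.List.max? (a :: y :: t) key
      = PySem.List.max? ((if key a < key y then y else a) :: t) key := by
  by_cases h : key a < key y <;> simp [PySem.List.max?, h]

lemma pv_max_cons (key : String → Nat) :
    ∀ (t : List String) (a : String),
      PySem.List.max? (a :: t) key
        = some (match PySem.List.max? t key with
                | none => a
                | some m => if key a < key m then m else a) := by
  intro t
  induction t with
  | nil => intro a; simp [PySem.List.max?]
  | cons y t ih =>
    intro a
    rw [pv_max_step, ih, ih y]
    cases h : PySem.List.max? t key <;>
      simp only [] <;> split_ifs <;> first | rfl | omega

lemma pv_max_congr (key key' : String → Nat) :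
    ∀ (xs : List String), (∀ x ∈ xs, key x = key' x) →
      PySem.List.max? xs key = PySem.List.max? xs key' := by
  intro xs
  induction xs with
  | nil => intro _; rfl
  | cons a t ih =>
    intro h
    rw [pv_max_cons, pv_max_cons, ih (fun x hx => h x (List.mem_cons_of_mem a hx))]
    have ha := h a List.mem_cons_self
    cases hm : PySem.List.max? t key' with
    | none => simp
    | some m =>
      have hmm : m ∈ t := PySem.List.max?_mem hm
      have hmk := h m (List.mem_cons_of_mem a hmm)
      simp only [Option.some.injEq]
      rw [ha, hmk]

lemma pv_sorted_rev_head (key : String → Nat) :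
    ∀ (ks : List String), ks.Nodup → ∀ b, PySem.List.max? ks key = some b →
      PySem.List.sorted ks key true
        = b :: PySem.List.sorted (ks.filter (fun k => !(k == b))) key true := by
  intro ks
  induction ks with
  | nil => intro _ b hb; simp [PySem.List.max?] at hb
  | cons a t ih =>
    intro hnd b hb
    have hnd' : t.Nodup := hnd.of_cons
    have hat : a ∉ t := (List.nodup_cons.mp hnd).1
    rw [pv_sorted_rev_cons]
    cases ht : t with
    | nil =>
      subst ht
      have hba : b = a := by
        rw [pv_max_cons] at hb
        simp [PySem.List.max?] at hb
        exact hb.symm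
      subst hba
      simp [pvInsA, PySem.List.insertBy, PySem.List.sorted]
    | cons y t' =>
      have htne : t ≠ [] := by rw [ht]; simp
      obtain ⟨m, hm⟩ : ∃ m, PySem.List.max? t key = some m := by
        cases h : PySem.List.max? t key with
        | none => exact absurd ((PySem.List.max?_eq_none_iff t key).mp h) htne
        | some m => exact ⟨m, rfl⟩
      have hmt : m ∈ t := PySem.List.max?_mem hm
      have ham : a ≠ m := fun h => hat (h ▸ hmt)
      rw [← ht] at *
      have hb' : b = if key a < key m then m else a := by
        rw [pv_max_cons, hm] at hb
        simpa using hb.symm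
      have hrec := ih hnd' m hm
      by_cases hc : key a < key m
      · rw [hb', if_pos hc]
        have hfil : (a :: t).filter (fun k => !(k == m)) = a :: t.filter (fun k => !(k == m)) := by
          simp [ham]
        rw [hfil, hrec, pv_sorted_rev_cons]
        have hstep : pvInsA key a (m :: PySem.List.sorted (t.filter (fun k => !(k == m))) key true)
            = m :: pvInsA key a (PySem.List.sorted (t.filter (fun k => !(k == m))) key true) := by
          simp only [pvInsA, PySem.List.insertBy]
          rw [if_neg (by simp; omega)]
        rw [hstep]
      · rw [hb', if_neg hc]
        have hfil : (a :: t).filter (fun k => !(k == a)) = t := by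
          simp only [List.filter_cons]
          rw [if_neg (by simp)]
          exact List.filter_eq_self.mpr (fun k hk => by
            simp only [Bool.not_eq_eq_eq_not, Bool.not_true, beq_eq_false_iff_ne]
            exact fun h => hat (h ▸ hk))
        rw [hfil, hrec]
        simp only [pvInsA, PySem.List.insertBy]
        rw [if_pos (by simp; omega)]

-- ----- B's pick over the sorted order = A's loop -----
lemma pv_loopR_congr (L L' : String → List Int) :
    ∀ (fuel : Nat) (ks : List String) (rem : PySem.Set Nat) (acc : PySem.Set String),
      (∀ k ∈ ks, L k = L' k) →
      pvLoopR L fuel ks rem acc = pvLoopR L' fuel ks rem acc := by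
  intro fuel
  induction fuel with
  | zero => intro ks rem acc _; rfl
  | succ fuel ih =>
    intro ks rem acc h
    simp only [pvLoopR]
    by_cases hrem : rem.isEmpty
    · simp [hrem]
    · simp only [hrem]
      rw [pv_max_congr (fun k => pvCountOnes (L k)) (fun k => pvCountOnes (L' k)) ks
        (fun k hk => by simp only [h k hk])]
      cases hb : PySem.List.max? ks (fun k => pvCountOnes (L' k)) with
      | none => rfl
      | some b =>
        have hbk : b ∈ ks := PySem.List.max?_mem hb
        simp only []
        rw [h b hbk]
        exact ih _ _ _ (fun k hk => h k (List.mem_of_mem_filter hk))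

lemma pv_main (L : String → List Int) :
    ∀ (fuel : Nat) (ks : List String) (rem : PySem.Set Nat) (acc : PySem.Set String),
      ks.Nodup → ks.length ≤ fuel →
      pvPickB (PySem.List.sorted ks (fun k => pvCountOnes (L k)) true)
        (fun k => PySem.Set.ofList (pvOnesIdx (L k))) rem acc
      = pvLoopR L fuel ks rem acc := by
  intro fuel
  induction fuel with
  | zero =>
    intro ks rem acc _ hlen
    have hks : ks = [] := List.eq_nil_of_length_eq_zero (Nat.le_zero.mp hlen)
    subst hks
    rfl
  | succ fuel ih =>
    intro ks rem acc hnd hlen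
    by_cases hrem : rem.isEmpty
    · have hA : pvLoopR L (fuel+1) ks rem acc = acc := by simp [pvLoopR, hrem]
      rw [hA]
      cases hs : PySem.List.sorted ks (fun k => pvCountOnes (L k)) true with
      | nil => rfl
      | cons k r => simp [pvPickB, hrem]
    · cases ks with
      | nil =>
        have hR : pvLoopR L (fuel+1) [] rem acc = acc := by
          simp [pvLoopR, PySem.List.max?, hrem]
        rw [hR]
        rfl
      | cons a t =>
        obtain ⟨b, hb⟩ : ∃ b, PySem.List.max? (a :: t) (fun k => pvCountOnes (L k)) = some b :=
          ⟨_, pv_max_cons _ t a⟩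
        have hbk : b ∈ a :: t := PySem.List.max?_mem hb
        rw [pv_sorted_rev_head _ _ hnd b hb]
        have hnd' : ((a :: t).filter (fun k => !(k == b))).Nodup := hnd.filter _
        have hlt : ((a :: t).filter (fun k => !(k == b))).length < (a :: t).length :=
          List.length_filter_lt_length_iff_exists.mpr ⟨b, hbk, by simp⟩
        have hlen' : ((a :: t).filter (fun k => !(k == b))).length ≤ fuel := by
          simp only [List.length_cons] at hlen hlt
          omega
        simp only [pvPickB, hrem]
        rw [ih _ _ _ hnd' hlen']
        simp [pvLoopR, hrem, hb]

-- keys of the filtered dict are the filtered keys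
lemma pv_map_fst_filter (b : String) :
    ∀ (d : List (String × List Int)),
      (d.filter (fun p => !(p.1 == b))).map Prod.fst
        = (d.map Prod.fst).filter (fun k => !(k == b)) := by
  intro d
  induction d with
  | nil => rfl
  | cons kv d ih =>
    by_cases h : kv.1 = b <;> simp [h, ih]

-- a surviving key looks up the same list after the deletion
lemma pv_lookup_filter (d : List (String × List Int)) (b k : String) (hkb : k ≠ b) :
    pvLookup (d.filter (fun p => !(p.1 == b))) k = pvLookup d k := by
  unfold pvLookup
  rw [List.find?_filter]
  have hpred : (fun p : String × List Int => decide ((!(p.1 == b)) = true ∧ (p.1 == k) = true))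
      = (fun p : String × List Int => p.1 == k) := by
    funext p
    by_cases hpk : p.1 = k <;> simp [hpk, hkb]
  rw [hpred]

-- ----- A's loop = the reference loop -----
lemma pv_a_eq_loopR :
    ∀ (fuel : Nat) (d : List (String × List Int)) (rem : PySem.Set Nat) (acc : PySem.Set String),
      (d.map Prod.fst).Nodup →
      pvLoopA fuel d rem acc = pvLoopR (pvLookup d) fuel (d.map Prod.fst) rem acc := by
  intro fuel
  induction fuel with
  | zero => intro d rem acc _; rfl
  | succ fuel ih =>
    intro d rem acc hnd
    by_cases hrem : rem.isEmpty
    · simp [pvLoopA, pvLoopR, hrem]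
    · cases hb : PySem.List.max? (d.map Prod.fst) (fun k => pvCountOnes (pvLookup d k)) with
      | none => simp [pvLoopA, pvLoopR, hrem, hb]
      | some b =>
        have hnd2 : ((d.filter (fun p => !(p.1 == b))).map Prod.fst).Nodup := by
          rw [pv_map_fst_filter]
          exact hnd.filter _
        have hA : pvLoopA (fuel+1) d rem acc
            = pvLoopA fuel (d.filter (fun p => !(p.1 == b)))
                (PySem.Set.diff rem (PySem.Set.ofList (pvOnesIdx (pvLookup d b))))
                (PySem.Set.add acc b) := by
          simp [pvLoopA, hrem, hb]
        have hR : pvLoopR (pvLookup d) (fuel+1) (d.map Prod.fst) rem acc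
            = pvLoopR (pvLookup d) fuel ((d.map Prod.fst).filter (fun k => !(k == b)))
                (PySem.Set.diff rem (PySem.Set.ofList (pvOnesIdx (pvLookup d b))))
                (PySem.Set.add acc b) := by
          simp [pvLoopR, hrem, hb]
        rw [hA, hR, ih _ _ _ hnd2, pv_map_fst_filter]
        apply pv_loopR_congr
        intro k hk
        have hkb : k ≠ b := by
          have := List.of_mem_filter hk
          simpa using this
        exact pv_lookup_filter d b k hkb

-- ----- counting / index-set facts -----
lemma pv_onesIdx_eq (lst : List Int) :
    pvOnesIdx lst = (((List.range lst.length).zip lst).filter (fun iv => iv.2 == 1)).map Prod.fst := by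
  unfold pvOnesIdx
  rw [PySem.List.foldl_append_if (fun iv => iv.2 == 1) Prod.fst]
  simp

lemma pv_onesIdx_nodup (lst : List Int) : (pvOnesIdx lst).Nodup := by
  rw [pv_onesIdx_eq]
  have hsub : ((((List.range lst.length).zip lst).filter (fun iv => iv.2 == 1)).map Prod.fst).Sublist
      (((List.range lst.length).zip lst).map Prod.fst) :=
    List.Sublist.map Prod.fst List.filter_sublist
  have hfst : ((List.range lst.length).zip lst).map Prod.fst = List.range lst.length :=
    List.map_fst_zip (by simp)
  exact ((hfst ▸ hsub).nodup) (List.nodup_range)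

lemma pv_ofList_onesIdx (lst : List Int) : PySem.Set.ofList (pvOnesIdx lst) = pvOnesIdx lst :=
  PySem.Set.ofList_eq_self_of_nodup _ (pv_onesIdx_nodup lst)

lemma pv_count_aux : ∀ (lst : List Int) (a : Nat),
    lst.foldl (fun s v => if v == 1 then s + 1 else s) a = a + lst.countP (fun v => v == 1) := by
  intro lst
  induction lst with
  | nil => intro a; simp
  | cons v t ih =>
    intro a
    simp only [List.foldl_cons, List.countP_cons]
    by_cases h : v = (1 : Int)
    · rw [if_pos (by simp [h]), ih]
      simp [h]
      omega
    · rw [if_neg (by simp [h]), ih]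
      simp [h]

lemma pv_cnt_eq (lst : List Int) : (PySem.Set.ofList (pvOnesIdx lst)).length = pvCountOnes lst := by
  rw [pv_ofList_onesIdx, pv_onesIdx_eq]
  unfold pvCountOnes
  rw [pv_count_aux]
  have hsnd : ((List.range lst.length).zip lst).map Prod.snd = lst := List.map_snd_zip (by simp)
  calc ((((List.range lst.length).zip lst).filter (fun iv => iv.2 == 1)).map Prod.fst).length
      = (((List.range lst.length).zip lst).filter (fun iv => iv.2 == 1)).length := by simp
    _ = ((List.range lst.length).zip lst).countP (fun iv => iv.2 == 1) := by
        exact Eq.symm List.countP_eq_length_filter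
    _ = lst.countP (fun v => v == 1) := by
        have hcp := List.countP_map (p := fun v : Int => v == 1) (f := Prod.snd)
          (l := (List.range lst.length).zip lst)
        rw [hsnd] at hcp
        rw [hcp]
        rfl
  omega

lemma pv_rem_fold :
    ∀ (d : List (String × List Int)) (pre : List Nat) (s : PySem.Set Nat),
      List.foldl PySem.Set.add s (d.foldl (fun acc kv => acc ++ pvOnesIdx kv.2) pre)
        = d.foldl (fun r kv => List.foldl PySem.Set.add r (pvOnesIdx kv.2)) (List.foldl PySem.Set.add s pre) := by
  intro d
  induction d with
  | nil => intro pre s; rfl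
  | cons kv d ih =>
    intro pre s
    simp only [List.foldl_cons]
    rw [ih, List.foldl_append]

-- ----- assembling the two ports -----
lemma pv_alt_keys (d : List (String × List Int)) :
    (d.map (fun kv => (kv.1, PySem.Set.ofList (pvOnesIdx kv.2)))).map Prod.fst = d.map Prod.fst := by
  rw [List.map_map]
  rfl

lemma pv_alt_lookup (d : List (String × List Int)) :
    (fun k => pvLookupS (d.map (fun kv => (kv.1, PySem.Set.ofList (pvOnesIdx kv.2)))) k)
      = (fun k => PySem.Set.ofList (pvOnesIdx (pvLookup d k))) := by
  funext k
  unfold pvLookupS pvLookup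
  rw [List.find?_map]
  have hpred : List.find? ((fun p : String × PySem.Set Nat => p.1 == k) ∘
      (fun kv : String × List Int => (kv.1, PySem.Set.ofList (pvOnesIdx kv.2)))) d
      = List.find? (fun p => p.1 == k) d := rfl
  rw [hpred]
  cases hf : List.find? (fun p => p.1 == k) d with
  | none => rfl
  | some kv => rfl

lemma pv_alt_rem (d : List (String × List Int)) :
    (d.map (fun kv => (kv.1, PySem.Set.ofList (pvOnesIdx kv.2)))).foldl
        (fun r kv => PySem.Set.union r kv.2) PySem.Set.empty
      = PySem.Set.ofList (d.foldl (fun acc kv => acc ++ pvOnesIdx kv.2) []) := by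
  rw [List.foldl_map]
  have hstep : (fun (r : PySem.Set Nat) (kv : String × List Int) =>
        PySem.Set.union r (PySem.Set.ofList (pvOnesIdx kv.2)))
      = (fun r kv => List.foldl PySem.Set.add r (pvOnesIdx kv.2)) := by
    funext r kv
    rw [pv_ofList_onesIdx]
    rfl
  rw [hstep]
  have hofl : PySem.Set.ofList (d.foldl (fun acc kv => acc ++ pvOnesIdx kv.2) [])
      = List.foldl PySem.Set.add ([] : PySem.Set Nat)
          (d.foldl (fun acc kv => acc ++ pvOnesIdx kv.2) []) := rfl
  rw [hofl, pv_rem_fold d [] []]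
  rfl

-- ===== VERDICT (by name: the statement is the Claim_ definition above) =====
theorem find_max_coverage_subset_spec : Claim_equal_find_max_coverage_subset := by
  intro d _ hpre
  unfold Spec_find_max_coverage_subset
  have hpre' : (d.map Prod.fst).Nodup := hpre
  have hB : find_max_coverage_subset_alt d
      = pvPickB
          (PySem.List.sorted
            ((d.map (fun kv => (kv.1, PySem.Set.ofList (pvOnesIdx kv.2)))).map Prod.fst)
            (fun k => (pvLookupS (d.map (fun kv => (kv.1, PySem.Set.ofList (pvOnesIdx kv.2)))) k).length) true)
          (fun k => pvLookupS (d.map (fun kv => (kv.1, PySem.Set.ofList (pvOnesIdx kv.2)))) k)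
          ((d.map (fun kv => (kv.1, PySem.Set.ofList (pvOnesIdx kv.2)))).foldl
            (fun r kv => PySem.Set.union r kv.2) PySem.Set.empty)
          PySem.Set.empty := rfl
  have hkey : (fun k => (pvLookupS (d.map (fun kv => (kv.1, PySem.Set.ofList (pvOnesIdx kv.2)))) k).length)
      = (fun k => pvCountOnes (pvLookup d k)) := by
    funext k
    rw [congrFun (pv_alt_lookup d) k, pv_cnt_eq]
  have hA : find_max_coverage_subset d
      = pvLoopA d.length d
          (PySem.Set.ofList (d.foldl (fun acc kv => acc ++ pvOnesIdx kv.2) []))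
          PySem.Set.empty := rfl
  rw [hA, hB, pv_alt_keys, hkey, pv_alt_lookup, pv_alt_rem,
    pv_a_eq_loopR d.length d _ _ hpre',
    pv_main (pvLookup d) d.length (d.map Prod.fst) _ _ hpre' (by simp)]
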